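-- pv_equiv track=rewrite | github.com/AbductiveLearning/ABL-KG | link_prediction/dbpedia/dbpedia_handler.py | get_object_of_entities
-- ===== SOURCE A (Python) =====
-- def get_object_of_entities(entity_list, triples):
--     obj_dict = dict()
--     object_list = list()
--     for s, p, o in triples:
--         obj_dict[s] = o
--     for entity in entity_list:
--         obj = obj_dict.get(entity, "[None]")
--         object_list.append(obj)
--     assert len(entity_list) == len(object_list)
--     return object_list
-- ===== SOURCE B (Python) =====
-- def get_object_of_entities(entity_list, triples):
--     object_list = []
--     for entity in entity_list:
--         obj = "[None]"
--         for s, p, o in triples: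
--             if s == entity:
--                 obj = o
--         object_list.append(obj)
--     return object_list
-- ===== Notes on version B (the rewrite author's own statement) =====
-- stated objective: alternative
-- what changed: Replaces A's build-a-dict-then-look-up strategy with a per-entity sequential scan of the triples that keeps the last matching object (last-write-wins, like the dict), with no global table.
import Mathlib
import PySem

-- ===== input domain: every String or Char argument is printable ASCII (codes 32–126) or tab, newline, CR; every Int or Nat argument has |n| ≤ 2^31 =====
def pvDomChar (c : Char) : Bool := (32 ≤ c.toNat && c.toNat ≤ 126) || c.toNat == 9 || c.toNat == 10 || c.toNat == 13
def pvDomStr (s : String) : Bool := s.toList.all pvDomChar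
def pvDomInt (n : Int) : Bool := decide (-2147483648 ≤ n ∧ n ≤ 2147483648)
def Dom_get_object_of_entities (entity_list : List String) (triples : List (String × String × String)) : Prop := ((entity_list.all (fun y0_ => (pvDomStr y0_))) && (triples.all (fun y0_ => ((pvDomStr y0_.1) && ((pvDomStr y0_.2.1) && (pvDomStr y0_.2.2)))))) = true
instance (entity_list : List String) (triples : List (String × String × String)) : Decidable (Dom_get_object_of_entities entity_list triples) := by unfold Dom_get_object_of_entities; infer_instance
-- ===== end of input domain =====

-- B replaces A's dict-index-then-lookup by a per-entity sequential scan keeping the last matching object; alternative decomposition, not claimed faster.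


-- ===== PORT A =====
def get_object_of_entities (entity_list : List String) (triples : List (String × String × String)) : List String :=
  let obj_dict : PySem.Dict String String :=
    triples.foldl (fun d t => d.insert t.1 t.2.2) PySem.Dict.empty
  entity_list.foldl (fun object_list entity => object_list ++ [obj_dict.getD entity "[None]"]) []

-- ===== PORT B =====
def get_object_of_entities_alt (entity_list : List String) (triples : List (String × String × String)) : List String :=
  entity_list.map (fun entity =>
    triples.foldl (fun obj t => if t.1 == entity then t.2.2 else obj) "[None]")

-- ===== PRECONDITION & SPEC =====
def Spec_get_object_of_entities (entity_list : List String) (triples : List (String × String × String)) (out : List String) : Prop := out = get_object_of_entities_alt entity_list triples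
instance (entity_list : List String) (triples : List (String × String × String)) (out : List String) : Decidable (Spec_get_object_of_entities entity_list triples out) := by unfold Spec_get_object_of_entities; infer_instance

-- ===== CLAIM (what is proved, stated in full; the proofs are below) =====
def Claim_equal_get_object_of_entities : Prop := ∀ (entity_list : List String) (triples : List (String × String × String)), Dom_get_object_of_entities entity_list triples → Spec_get_object_of_entities entity_list triples (get_object_of_entities entity_list triples)

-- ===== LEMMAS AND PROOFS =====

-- The dict built by inserting all triples, looked up at e, is the last matching object (scan form).
theorem getD_foldl_insert_eq_scan (triples : List (String × String × String))
    (d : PySem.Dict String String) (e : String) :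
    (triples.foldl (fun d t => d.insert t.1 t.2.2) d).getD e "[None]"
      = triples.foldl (fun obj t => if t.1 == e then t.2.2 else obj) (d.getD e "[None]") := by
  induction triples generalizing d with
  | nil => rfl
  | cons t ts ih =>
    rw [List.foldl_cons, List.foldl_cons, ih]
    congr 1
    rw [PySem.Dict.getD_insert]
    by_cases h : t.1 = e
    · simp [h]
    · simp [beq_iff_eq, h, Ne.symm h]

theorem foldl_append_eq_map (l : List String) (f : String → String) (acc : List String) :
    l.foldl (fun object_list entity => object_list ++ [f entity]) acc = acc ++ l.map f := by
  induction l generalizing acc with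
  | nil => simp
  | cons x xs ih => simp [ih]

-- ===== VERDICT (by name: the statement is the Claim_ definition above) =====
theorem get_object_of_entities_spec : Claim_equal_get_object_of_entities := by
  intro entity_list triples _
  unfold Spec_get_object_of_entities get_object_of_entities get_object_of_entities_alt
  rw [foldl_append_eq_map]
  simp only [List.nil_append]
  exact List.map_congr_left (fun e _ => getD_foldl_insert_eq_scan triples PySem.Dict.empty e)
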